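-- pv_equiv track=rewrite | github.com/ahmedsaeedsaid/OCR-Arabic | segmentation_algorithms.py | count_spaces_connected
-- ===== SOURCE A (Python) =====
-- def count_spaces_connected(list):
--     count_spaces=[]
--     count=0
--     start_zero = not (list[0]==0)
--     for value in list :
--         if value==0 and start_zero:
--             count+=1
--         elif value!=0:
--             start_zero=True
--             if count!=0:
--                 count_spaces.append(count)
--                 count=0
--     return count_spaces
-- ===== SOURCE B (Python) =====
-- def count_spaces_connected(list):
--     # indices of the nonzero elements; interior zero-run lengths are the gaps
--     idx = [i for i, v in enumerate(list) if v != 0]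
--     return [b - a - 1 for a, b in zip(idx, idx[1:]) if b - a > 1]
-- ===== Notes on version B (the rewrite author's own statement) =====
-- stated objective: alternative
-- what changed: Replaces A's stateful single pass (count/start_zero flags) by an index-table computation: collect the indices of nonzero elements and emit each positive gap between consecutive indices minus one.
import Mathlib
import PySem

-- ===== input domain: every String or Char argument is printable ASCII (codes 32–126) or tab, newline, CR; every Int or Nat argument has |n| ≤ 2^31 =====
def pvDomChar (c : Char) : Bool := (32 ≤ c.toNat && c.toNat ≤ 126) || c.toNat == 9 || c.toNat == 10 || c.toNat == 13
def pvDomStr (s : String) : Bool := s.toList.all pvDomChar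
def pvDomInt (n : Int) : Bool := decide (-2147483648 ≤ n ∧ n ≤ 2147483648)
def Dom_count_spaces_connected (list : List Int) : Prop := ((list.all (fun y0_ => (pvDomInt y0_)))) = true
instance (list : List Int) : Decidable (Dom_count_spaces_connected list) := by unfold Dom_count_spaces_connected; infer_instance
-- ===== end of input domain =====

-- B replaces A's stateful flag/counter pass by a nonzero-index table whose consecutive
-- gaps give the interior zero-run lengths (objective: alternative decomposition).

-- ===== PORT A =====
-- loop body of A: state = (count_spaces, count, start_zero)
def pvStepA (st : List Int × Int × Bool) (value : Int) : List Int × Int × Bool :=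
  let (count_spaces, count, start_zero) := st
  if value == 0 && start_zero then (count_spaces, count + 1, start_zero)
  else if value != 0 then
    if count != 0 then (count_spaces ++ [count], 0, true)
    else (count_spaces, count, true)
  else (count_spaces, count, start_zero)

-- A indexes element 0 up front; pyGet? returns none on the empty list (IndexError), excluded by Pre_ (the getD default is unreachable inside Pre_)
def count_spaces_connected (list : List Int) : List Int :=
  let start_zero := !(((PySem.List.pyGet? list 0).getD 0) == 0)
  (list.foldl pvStepA ([], 0, start_zero)).1

-- ===== PORT B =====
def count_spaces_connected_alt (list : List Int) : List Int :=
  let idx := ((PySem.List.enumerate list).filter (fun p => p.2 != 0)).map (·.1)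
  ((idx.zip (idx.drop 1)).filter (fun p => decide (p.2 - p.1 > 1))).map (fun p => p.2 - p.1 - 1)

-- ===== PRECONDITION & SPEC =====
-- A indexes the first element before the loop, so the empty list raises IndexError.
def Pre_count_spaces_connected (list : List Int) : Prop := list ≠ []
instance (list : List Int) : Decidable (Pre_count_spaces_connected list) := by unfold Pre_count_spaces_connected; infer_instance
def pvWitness_count_spaces_connected : List Int := [1, 0, 0, 3, 0]

def Spec_count_spaces_connected (list : List Int) (out : List Int) : Prop := out = count_spaces_connected_alt list
instance (list : List Int) (out : List Int) : Decidable (Spec_count_spaces_connected list out) := by unfold Spec_count_spaces_connected; infer_instance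

-- ===== CLAIM (what is proved, stated in full; the proofs are below) =====
def Claim_equal_count_spaces_connected : Prop := ∀ (list : List Int), Dom_count_spaces_connected list → Pre_count_spaces_connected list → Spec_count_spaces_connected list (count_spaces_connected list)

-- ===== LEMMAS AND PROOFS =====

-- interior zero-run lengths while a nonzero has been seen and c zeros are pending
def pvGaps (c : Int) : List Int → List Int
  | [] => []
  | v :: t => if v = 0 then pvGaps (c + 1) t else (if c ≠ 0 then [c] else []) ++ pvGaps 0 t

-- indices (starting at i) of the nonzero elements
def pvNzi (i : Int) : List Int → List Int
  | [] => []
  | v :: t => if v = 0 then pvNzi (i + 1) t else i :: pvNzi (i + 1) t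

-- B's gap computation on an index list
def pvB (idx : List Int) : List Int :=
  ((idx.zip (idx.drop 1)).filter (fun p => decide (p.2 - p.1 > 1))).map (fun p => p.2 - p.1 - 1)

theorem pvB_cons_cons (p j : Int) (r : List Int) :
    pvB (p :: j :: r) = (if j - p > 1 then [j - p - 1] else []) ++ pvB (j :: r) := by
  have hz : (p :: j :: r).zip ((p :: j :: r).drop 1) = (p, j) :: (j :: r).zip ((j :: r).drop 1) := by
    cases r <;> simp
  simp only [pvB, hz, List.filter_cons]
  by_cases h : j - p > 1
  · simp [h]
  · simp [h]

theorem pvB_pair : ∀ (l : List Int) (i p : Int), p < i →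
    pvB (p :: pvNzi i l) = pvGaps (i - p - 1) l := by
  intro l
  induction l with
  | nil => intro i p _; simp [pvNzi, pvGaps, pvB]
  | cons v t ih =>
    intro i p hpi
    by_cases hv : v = 0
    · rw [pvNzi, if_pos hv, pvGaps, if_pos hv, ih (i + 1) p (by omega)]
      congr 1; omega
    · rw [pvNzi, if_neg hv, pvGaps, if_neg hv]
      rw [pvB_cons_cons, ih (i + 1) i (by omega)]
      have h0 : i + 1 - i - 1 = (0 : Int) := by omega
      rw [h0]
      congr 1
      by_cases h1 : i - p > 1
      · rw [if_pos h1, if_pos (by omega : i - p - 1 ≠ 0)]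
      · rw [if_neg h1, if_neg (by omega : ¬ i - p - 1 ≠ 0)]

theorem foldA_true : ∀ (l : List Int) (cs : List Int) (c : Int),
    (l.foldl pvStepA (cs, c, true)).1 = cs ++ pvGaps c l := by
  intro l
  induction l with
  | nil => intro cs c; simp [pvGaps]
  | cons v t ih =>
    intro cs c
    by_cases hv : v = 0
    · simp [List.foldl, pvStepA, hv, pvGaps, ih]
    · by_cases hc : c = 0
      · simp [List.foldl, pvStepA, hv, hc, pvGaps, ih]
      · simp [List.foldl, pvStepA, hv, hc, pvGaps, ih]

theorem foldA_false : ∀ (l : List Int) (cs : List Int) (i : Int),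
    (l.foldl pvStepA (cs, 0, false)).1 = cs ++ pvB (pvNzi i l) := by
  intro l
  induction l with
  | nil => intro cs i; simp [pvNzi, pvB]
  | cons v t ih =>
    intro cs i
    by_cases hv : v = 0
    · rw [pvNzi, if_pos hv, List.foldl]
      have hs : pvStepA (cs, 0, false) v = (cs, 0, false) := by simp [pvStepA, hv]
      rw [hs, ih cs (i + 1)]
    · rw [pvNzi, if_neg hv, List.foldl]
      have hs : pvStepA (cs, 0, false) v = (cs, 0, true) := by simp [pvStepA, hv]
      rw [hs, foldA_true, pvB_pair t (i + 1) i (by omega)]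
      norm_num

theorem nzi_of_enumerate : ∀ (l : List Int) (s : Int),
    ((PySem.List.enumerate l s).filter (fun p => p.2 != 0)).map (·.1) = pvNzi s l := by
  intro l
  induction l with
  | nil => intro s; simp [pvNzi, PySem.List.enumerate_nil]
  | cons v t ih =>
    intro s
    by_cases hv : v = 0 <;>
      simp [PySem.List.enumerate_cons, pvNzi, hv, ih]

theorem alt_eq_pvB (list : List Int) : count_spaces_connected_alt list = pvB (pvNzi 0 list) := by
  unfold count_spaces_connected_alt
  rw [nzi_of_enumerate]
  rfl

-- ===== VERDICT (by name: the statement is the Claim_ definition above) =====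
theorem count_spaces_connected_spec : Claim_equal_count_spaces_connected := by
  intro list _ hpre
  unfold Spec_count_spaces_connected count_spaces_connected
  rw [alt_eq_pvB]
  cases list with
  | nil => exact absurd rfl hpre
  | cons v t =>
    by_cases hv : v = 0
    · subst hv
      have h0 : PySem.List.pyGet? ((0:Int) :: t) 0 = some 0 := by
        simp [PySem.List.pyGet?, PySem.List.pyIdx?]
      rw [h0, show ((some (0:Int)).getD 0) = 0 from rfl]
      rw [show (!((0:Int) == 0)) = false by decide, foldA_false (0 :: t) [] 0]
      simp
    · have h0 : PySem.List.pyGet? (v :: t) 0 = some v := by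
        simp [PySem.List.pyGet?, PySem.List.pyIdx?]
      rw [h0, show ((some v).getD 0) = v from rfl]
      rw [show (!(v == 0)) = true by simp [hv], foldA_true]
      rw [pvGaps, if_neg hv, pvNzi, if_neg hv]
      rw [show (0:Int) + 1 = 1 from rfl, pvB_pair t 1 0 (by omega)]
      norm_num
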